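-- pv_equiv track=rewrite | github.com/sepandhaghighi/findip | ip_finder.py | ip_filter
-- ===== SOURCE A (Python) =====
-- import string
--
-- def ip_filter(i_list): # This Function Get A List Of IPs and Split IP
--     '''((list)->list'''
--     dic = list(string.digits + ".")
--     temp_list=[]
--     for i in range(len(i_list)):
--         for j in range(len(i_list[i])):
--             if i_list[i][j] not in dic:
--                 temp_list.append(i_list[i][:j])
--                 break
--     return temp_list
-- ===== SOURCE B (Python) =====
-- import string
--
-- def ip_filter(i_list):
--     allowed = set(string.digits + ".")
--     out = []
--     for s in i_list:
--         bad = set(s) - allowed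
--         if bad:
--             out.append(s[:min(s.index(c) for c in bad)])
--     return out
-- ===== Notes on version B (the rewrite author's own statement) =====
-- stated objective: alternative
-- what changed: Instead of scanning each string left-to-right for the first disallowed character, B computes the set difference set(s) - allowed and cuts at the minimum of the first-occurrence indices of the offending characters (empty difference means the string is dropped).
import Mathlib
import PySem

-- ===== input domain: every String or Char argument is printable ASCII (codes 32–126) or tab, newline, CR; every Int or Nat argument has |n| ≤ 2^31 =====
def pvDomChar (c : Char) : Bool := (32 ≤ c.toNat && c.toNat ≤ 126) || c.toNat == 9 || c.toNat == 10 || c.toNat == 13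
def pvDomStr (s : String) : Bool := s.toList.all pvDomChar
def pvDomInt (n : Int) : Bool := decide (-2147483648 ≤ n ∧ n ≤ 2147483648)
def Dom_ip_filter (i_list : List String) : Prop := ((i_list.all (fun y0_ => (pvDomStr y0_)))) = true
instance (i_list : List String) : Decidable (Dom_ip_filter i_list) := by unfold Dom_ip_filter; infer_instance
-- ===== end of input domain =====

-- B replaces A's left-to-right scan for the first disallowed character by a set-difference
-- (set(s) - allowed) plus a minimum over the first-occurrence indices of the offending
-- characters; an 'alternative' decomposition, not claimed faster.

-- ===== PORT A =====
-- dic = list(string.digits + ".")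
def ipDic : List Char := "0123456789.".toList

-- inner loop: for j in range(len(s)): if s[j] not in dic: return the break position j
def ipFindBad : List Char → Nat → Option Nat
  | [], _ => none
  | c :: rest, j => if c ∉ ipDic then some j else ipFindBad rest (j + 1)

-- outer loop; s[:j] with 0 ≤ j ≤ len(s) is exactly take j
def ip_filter (i_list : List String) : List String :=
  i_list.foldl (fun temp_list s =>
    match ipFindBad s.toList 0 with
    | some j => temp_list ++ [String.ofList (s.toList.take j)]
    | none => temp_list) []

-- ===== PORT B =====
-- allowed = set(string.digits + ".")
def ipAllowed : PySem.Set Char := PySem.Set.ofList ipDic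

-- s.index(c): c is always drawn from set(s) here, so str.index never raises; getD 0 is unreachable
def ipIdx (cs : List Char) (c : Char) : Nat := (PySem.List.index? cs c).getD 0

-- bad = set(s) - allowed; if bad: out.append(s[:min(s.index(c) for c in bad)])
-- (min over the set is order-independent, so iterating the Set's list order is exact)
def ip_filter_alt (i_list : List String) : List String :=
  i_list.foldl (fun out s =>
    let bad : PySem.Set Char := PySem.Set.diff (PySem.Set.ofList s.toList) ipAllowed
    match PySem.List.min? (bad.map (fun c => ipIdx s.toList c)) (fun x => x) with
    | some j => out ++ [String.ofList (s.toList.take j)]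
    | none => out) []

-- ===== PRECONDITION & SPEC =====
def Spec_ip_filter (i_list : List String) (out : List String) : Prop := out = ip_filter_alt i_list
instance (i_list : List String) (out : List String) : Decidable (Spec_ip_filter i_list out) := by unfold Spec_ip_filter; infer_instance

-- ===== CLAIM =====
def Claim_equal_ip_filter : Prop := ∀ (i_list : List String), Dom_ip_filter i_list → Spec_ip_filter i_list (ip_filter i_list)

-- ===== LEMMAS AND PROOFS =====

-- A's inner loop returns the length of the allowed prefix (or none when every char is allowed)
theorem ipFindBad_eq (cs : List Char) (j : Nat) :
    ipFindBad cs j = if (cs.dropWhile (· ∈ ipDic)) = [] then none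
      else some (j + (cs.takeWhile (· ∈ ipDic)).length) := by
  induction cs generalizing j with
  | nil => simp [ipFindBad]
  | cons c rest ih =>
    by_cases h : c ∈ ipDic
    · simp [ipFindBad, h, ih]
      split
      · simp
      · simp; omega
    · simp [ipFindBad, h]

theorem mem_bad_iff (cs : List Char) (c : Char) :
    c ∈ PySem.Set.diff (PySem.Set.ofList cs) ipAllowed ↔ c ∈ cs ∧ c ∉ ipDic := by
  rw [PySem.Set.mem_diff, PySem.Set.mem_ofList, ipAllowed, PySem.Set.mem_ofList]

-- every position strictly before the allowed-prefix length holds an allowed char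
theorem getElem_lt_takeWhile (cs : List Char) (j : Nat)
    (hj : j < (cs.takeWhile (· ∈ ipDic)).length) (hjl : j < cs.length) :
    cs[j] ∈ ipDic := by
  have hpre := List.takeWhile_prefix (l := cs) (p := (· ∈ ipDic))
  have := hpre.getElem hj
  have hmem : cs[j] ∈ cs.takeWhile (· ∈ ipDic) := by
    exact this ▸ List.getElem_mem _

  have := List.mem_takeWhile_imp hmem
  simpa using this

-- the index of any bad character is at least the allowed-prefix length
theorem idx_ge (cs : List Char) (c : Char) (hc : c ∈ cs) (hbad : c ∉ ipDic) :
    (cs.takeWhile (· ∈ ipDic)).length ≤ ipIdx cs c := by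
  have hsome : (PySem.List.index? cs c).isSome = true :=
    (PySem.List.index?_isSome_iff (xs := cs) (v := c)).2 hc
  obtain ⟨k, hk⟩ := Option.isSome_iff_exists.mp hsome
  have hidx : ipIdx cs c = k := by rw [ipIdx, hk]; rfl
  obtain ⟨hkl, hck, _⟩ := PySem.List.getElem_of_index?_eq_some hk
  rw [hidx]
  by_contra hlt
  rw [Nat.not_le] at hlt
  have := getElem_lt_takeWhile cs k hlt hkl
  rw [hck] at this
  exact hbad this

-- the head of dropWhile fails the predicate
theorem dropWhile_head_not (P : Char → Bool) : ∀ (cs : List Char) (c0 : Char) (rest : List Char),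
    cs.dropWhile P = c0 :: rest → P c0 = false := by
  intro cs
  induction cs with
  | nil => intro _ _ h; simp [List.dropWhile] at h
  | cons a t ih =>
    intro c0 rest h
    by_cases hp : P a
    · simp only [List.dropWhile_cons, hp, if_true] at h
      exact ih _ _ h
    · simp only [List.dropWhile_cons, hp, if_false, List.cons.injEq] at h
      obtain ⟨rfl, -⟩ := h
      simpa using hp

-- B's min-of-indices computation equals A's first-bad-position scan
theorem ipB_eq (cs : List Char) :
    PySem.List.min? ((PySem.Set.diff (PySem.Set.ofList cs) ipAllowed).map
      (fun c => ipIdx cs c)) (fun x => x) = ipFindBad cs 0 := by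
  rw [ipFindBad_eq]
  by_cases hd : cs.dropWhile (· ∈ ipDic) = []
  · have hall := List.dropWhile_eq_nil_iff.mp hd
    have hbad : PySem.Set.diff (PySem.Set.ofList cs) ipAllowed = [] := by
      rw [List.eq_nil_iff_forall_not_mem]
      intro c hc
      obtain ⟨hcs, hnd⟩ := (mem_bad_iff cs c).mp hc
      exact hnd (by simpa using hall c hcs)
    simp [hd, hbad, PySem.List.min?]
  · rw [if_neg hd]
    set p := (cs.takeWhile (· ∈ ipDic)).length with hp
    obtain ⟨c0, rest, hat⟩ := List.exists_cons_of_ne_nil hd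
    have hc0bad : c0 ∉ ipDic := by
      have := dropWhile_head_not (fun c => decide (c ∈ ipDic)) cs c0 rest hat
      simpa using this
    have hsplit : cs = cs.takeWhile (· ∈ ipDic) ++ c0 :: rest := by
      conv_lhs => rw [← List.takeWhile_append_dropWhile (p := fun c => decide (c ∈ ipDic)) (l := cs)]
      rw [hat]
    have hc0cs : c0 ∈ cs := by rw [hsplit]; simp
    have hc0pre : c0 ∉ cs.takeWhile (· ∈ ipDic) := fun h =>
      hc0bad (by simpa using List.mem_takeWhile_imp h)
    have hidx0 : ipIdx cs c0 = p := by
      have : PySem.List.index? cs c0 = some p :=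
        (PySem.List.index?_eq_some_iff cs c0 p).mpr
          ⟨cs.takeWhile (· ∈ ipDic), rest, hsplit, rfl, hc0pre⟩
      rw [ipIdx, this]; rfl
    set mapped := ((PySem.Set.diff (PySem.Set.ofList cs) ipAllowed).map (fun c => ipIdx cs c))
    have hpmem : p ∈ mapped := by
      refine List.mem_map.mpr ⟨c0, (mem_bad_iff cs c0).mpr ⟨hc0cs, hc0bad⟩, hidx0⟩
    have hlb : ∀ y ∈ mapped, p ≤ y := by
      intro y hy
      obtain ⟨c, hc, rfl⟩ := List.mem_map.mp hy
      obtain ⟨hcs, hnd⟩ := (mem_bad_iff cs c).mp hc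
      exact idx_ge cs c hcs hnd
    have hne : mapped ≠ [] := fun h => by rw [h] at hpmem; exact absurd hpmem (List.not_mem_nil)
    cases hmin : PySem.List.min? mapped (fun x => x) with
    | none => exact absurd ((PySem.List.min?_eq_none_iff mapped _).mp hmin) hne
    | some m =>
      have h1 := PySem.List.min?_isMin hmin p hpmem
      have h2 := hlb m (PySem.List.min?_mem hmin)
      simp only [Option.some.injEq]
      omega

-- A = B, as plain equality of the two folds
theorem ip_filter_eq (i_list : List String) : ip_filter i_list = ip_filter_alt i_list := by
  unfold ip_filter ip_filter_alt
  induction i_list using List.reverseRecOn with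
  | nil => rfl
  | append_singleton xs x ih =>
    rw [List.foldl_append, List.foldl_append, List.foldl_cons, List.foldl_cons,
      List.foldl_nil, List.foldl_nil, ih]
    simp only [ipB_eq]

theorem ip_filter_spec : Claim_equal_ip_filter := fun i_list _ => ip_filter_eq i_list
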